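-- pv_equiv track=rewrite | github.com/ctreix/alumni-tracker-web | scorer.py | _infer_kategori
-- ===== SOURCE A (Python) =====
-- def _infer_kategori(posisi: str, tempat_kerja: str) -> str:
--     """Infer job category from position and company"""
--     posisi_lower = posisi.lower()
--     company_lower = tempat_kerja.lower()
--
--     if any(word in posisi_lower for word in ['manager', 'director', 'head', 'lead', 'chief', 'supervisor']):
--         return 'Manajemen'
--     elif any(word in posisi_lower for word in ['developer', 'programmer', 'engineer', 'analyst', 'IT', 'data']):
--         return 'Teknik/Teknologi'
--     elif any(word in posisi_lower for word in ['consultant', 'advisor', 'specialist']):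
--         return 'Konsultan'
--     elif any(word in posisi_lower for word in ['teacher', 'lecturer', 'dosen', 'guru', 'academic']):
--         return 'Akademisi'
--     elif any(word in company_lower for word in ['university', 'universitas', 'sekolah', 'institute', 'academy']):
--         return 'Akademisi'
--     elif any(word in posisi_lower for word in ['doctor', 'physician', 'medical', 'nurse']):
--         return 'Kesehatan'
--     elif any(word in posisi_lower for word in ['lawyer', 'attorney', 'advocate', 'legal']):
--         return 'Hukum'
--     elif any(word in posisi_lower for word in ['accountant', 'finance', 'accounting', 'auditor']):
--         return 'Akuntansi/Keuangan'
--     elif tempat_kerja: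
--         return 'Industri/Swasta'
--
--     return ''
-- ===== SOURCE B (Python) =====
-- # Flat keyword->(field, priority, category) map with a min-priority selection pass:
-- # no ordered rule chain, no early return; we scan every keyword once and keep the
-- # best (lowest-priority) match seen, then fall back on company truthiness.
-- _KEYWORDS = {
--     'manager': (0, 0, 'Manajemen'),
--     'director': (0, 0, 'Manajemen'),
--     'head': (0, 0, 'Manajemen'),
--     'lead': (0, 0, 'Manajemen'),
--     'chief': (0, 0, 'Manajemen'),
--     'supervisor': (0, 0, 'Manajemen'),
--     'developer': (0, 1, 'Teknik/Teknologi'),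
--     'programmer': (0, 1, 'Teknik/Teknologi'),
--     'engineer': (0, 1, 'Teknik/Teknologi'),
--     'analyst': (0, 1, 'Teknik/Teknologi'),
--     'IT': (0, 1, 'Teknik/Teknologi'),
--     'data': (0, 1, 'Teknik/Teknologi'),
--     'consultant': (0, 2, 'Konsultan'),
--     'advisor': (0, 2, 'Konsultan'),
--     'specialist': (0, 2, 'Konsultan'),
--     'teacher': (0, 3, 'Akademisi'),
--     'lecturer': (0, 3, 'Akademisi'),
--     'dosen': (0, 3, 'Akademisi'),
--     'guru': (0, 3, 'Akademisi'),
--     'academic': (0, 3, 'Akademisi'),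
--     'university': (1, 4, 'Akademisi'),
--     'universitas': (1, 4, 'Akademisi'),
--     'sekolah': (1, 4, 'Akademisi'),
--     'institute': (1, 4, 'Akademisi'),
--     'academy': (1, 4, 'Akademisi'),
--     'doctor': (0, 5, 'Kesehatan'),
--     'physician': (0, 5, 'Kesehatan'),
--     'medical': (0, 5, 'Kesehatan'),
--     'nurse': (0, 5, 'Kesehatan'),
--     'lawyer': (0, 6, 'Hukum'),
--     'attorney': (0, 6, 'Hukum'),
--     'advocate': (0, 6, 'Hukum'),
--     'legal': (0, 6, 'Hukum'),
--     'accountant': (0, 7, 'Akuntansi/Keuangan'),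
--     'finance': (0, 7, 'Akuntansi/Keuangan'),
--     'accounting': (0, 7, 'Akuntansi/Keuangan'),
--     'auditor': (0, 7, 'Akuntansi/Keuangan'),
-- }
--
-- def _infer_kategori(posisi: str, tempat_kerja: str) -> str:
--     texts = (posisi.lower(), tempat_kerja.lower())
--     best = None
--     for kw, (field, prio, cat) in _KEYWORDS.items():
--         if kw in texts[field] and (best is None or prio < best[0]):
--             best = (prio, cat)
--     if best is not None:
--         return best[1]
--     return 'Industri/Swasta' if tempat_kerja else ''
-- ===== Notes on version B (the rewrite author's own statement) =====
-- stated objective: alternative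
-- what changed: Replaced the ordered if/elif rule chain with early returns by a flat keyword->(field,priority,category) map scanned once while keeping the minimum-priority match, selecting the winning category afterwards (correct because priorities are listed nondecreasing, so the best match equals the first-firing rule).
import Mathlib
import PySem

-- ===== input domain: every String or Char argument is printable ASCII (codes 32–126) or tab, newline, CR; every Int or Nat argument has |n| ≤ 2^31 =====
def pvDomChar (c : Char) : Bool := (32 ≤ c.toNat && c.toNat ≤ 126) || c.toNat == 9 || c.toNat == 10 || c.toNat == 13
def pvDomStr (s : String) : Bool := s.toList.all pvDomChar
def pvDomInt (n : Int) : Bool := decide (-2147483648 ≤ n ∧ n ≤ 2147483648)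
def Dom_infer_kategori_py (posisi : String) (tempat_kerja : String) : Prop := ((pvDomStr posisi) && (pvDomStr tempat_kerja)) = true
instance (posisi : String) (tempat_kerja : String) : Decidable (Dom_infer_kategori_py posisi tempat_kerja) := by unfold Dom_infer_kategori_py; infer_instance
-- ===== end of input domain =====

-- B replaces A's if/elif chain (first match, early return) by a single pass over a flat
-- keyword→(field, priority, category) map maintaining the minimum-priority match (alternative; same cost).

-- ===== PORT A =====
-- literal transliteration of the if/elif chain
def infer_kategori_py (posisi : String) (tempat_kerja : String) : String :=
  let posisi_lower := PySem.Str.lower posisi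
  let company_lower := PySem.Str.lower tempat_kerja
  if ["manager", "director", "head", "lead", "chief", "supervisor"].any
      (fun w => PySem.Str.isIn w posisi_lower) then "Manajemen"
  else if ["developer", "programmer", "engineer", "analyst", "IT", "data"].any
      (fun w => PySem.Str.isIn w posisi_lower) then "Teknik/Teknologi"
  else if ["consultant", "advisor", "specialist"].any
      (fun w => PySem.Str.isIn w posisi_lower) then "Konsultan"
  else if ["teacher", "lecturer", "dosen", "guru", "academic"].any
      (fun w => PySem.Str.isIn w posisi_lower) then "Akademisi"
  else if ["university", "universitas", "sekolah", "institute", "academy"].any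
      (fun w => PySem.Str.isIn w company_lower) then "Akademisi"
  else if ["doctor", "physician", "medical", "nurse"].any
      (fun w => PySem.Str.isIn w posisi_lower) then "Kesehatan"
  else if ["lawyer", "attorney", "advocate", "legal"].any
      (fun w => PySem.Str.isIn w posisi_lower) then "Hukum"
  else if ["accountant", "finance", "accounting", "auditor"].any
      (fun w => PySem.Str.isIn w posisi_lower) then "Akuntansi/Keuangan"
  else if tempat_kerja ≠ "" then "Industri/Swasta"
  else ""

-- ===== PORT B =====
-- the flat keyword map from Source B (dict → assoc list; field 0/1 → Bool false/true)
def ikKeywords : List (String × Bool × Nat × String) :=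
  [ ("manager", false, 0, "Manajemen"), ("director", false, 0, "Manajemen"),
    ("head", false, 0, "Manajemen"), ("lead", false, 0, "Manajemen"),
    ("chief", false, 0, "Manajemen"), ("supervisor", false, 0, "Manajemen"),
    ("developer", false, 1, "Teknik/Teknologi"), ("programmer", false, 1, "Teknik/Teknologi"),
    ("engineer", false, 1, "Teknik/Teknologi"), ("analyst", false, 1, "Teknik/Teknologi"),
    ("IT", false, 1, "Teknik/Teknologi"), ("data", false, 1, "Teknik/Teknologi"),
    ("consultant", false, 2, "Konsultan"), ("advisor", false, 2, "Konsultan"),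
    ("specialist", false, 2, "Konsultan"),
    ("teacher", false, 3, "Akademisi"), ("lecturer", false, 3, "Akademisi"),
    ("dosen", false, 3, "Akademisi"), ("guru", false, 3, "Akademisi"),
    ("academic", false, 3, "Akademisi"),
    ("university", true, 4, "Akademisi"), ("universitas", true, 4, "Akademisi"),
    ("sekolah", true, 4, "Akademisi"), ("institute", true, 4, "Akademisi"),
    ("academy", true, 4, "Akademisi"),
    ("doctor", false, 5, "Kesehatan"), ("physician", false, 5, "Kesehatan"),
    ("medical", false, 5, "Kesehatan"), ("nurse", false, 5, "Kesehatan"),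
    ("lawyer", false, 6, "Hukum"), ("attorney", false, 6, "Hukum"),
    ("advocate", false, 6, "Hukum"), ("legal", false, 6, "Hukum"),
    ("accountant", false, 7, "Akuntansi/Keuangan"), ("finance", false, 7, "Akuntansi/Keuangan"),
    ("accounting", false, 7, "Akuntansi/Keuangan"), ("auditor", false, 7, "Akuntansi/Keuangan") ]

-- loop body: keep the minimum-priority matching keyword seen so far
def ikStep (p c : String) (best : Option (Nat × String)) (e : String × Bool × Nat × String) :
    Option (Nat × String) :=
  if PySem.Str.isIn e.1 (cond e.2.1 c p) && best.elim true (fun b => decide (e.2.2.1 < b.1)) then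
    some (e.2.2.1, e.2.2.2)
  else best

def infer_kategori_py_alt (posisi : String) (tempat_kerja : String) : String :=
  match ikKeywords.foldl (ikStep (PySem.Str.lower posisi) (PySem.Str.lower tempat_kerja)) none with
  | some b => b.2
  | none => if tempat_kerja ≠ "" then "Industri/Swasta" else ""

-- ===== PRECONDITION & SPEC =====
def Spec_infer_kategori_py (posisi : String) (tempat_kerja : String) (out : String) : Prop := out = infer_kategori_py_alt posisi tempat_kerja
instance (posisi : String) (tempat_kerja : String) (out : String) : Decidable (Spec_infer_kategori_py posisi tempat_kerja out) := by unfold Spec_infer_kategori_py; infer_instance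

-- ===== CLAIM (what is proved, stated in full; the proofs are below) =====
def Claim_equal_infer_kategori_py : Prop := ∀ (posisi : String) (tempat_kerja : String), Dom_infer_kategori_py posisi tempat_kerja → Spec_infer_kategori_py posisi tempat_kerja (infer_kategori_py posisi tempat_kerja)

-- ===== LEMMAS AND PROOFS =====

-- a group of keywords sharing field, priority and category
def ikGroup (f : Bool) (i : Nat) (cat : String) (ws : List String) :
    List (String × Bool × Nat × String) :=
  ws.map (fun w => (w, f, i, cat))

theorem ikKeywords_eq :
    ikKeywords =
      ikGroup false 0 "Manajemen" ["manager", "director", "head", "lead", "chief", "supervisor"] ++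
      (ikGroup false 1 "Teknik/Teknologi" ["developer", "programmer", "engineer", "analyst", "IT", "data"] ++
      (ikGroup false 2 "Konsultan" ["consultant", "advisor", "specialist"] ++
      (ikGroup false 3 "Akademisi" ["teacher", "lecturer", "dosen", "guru", "academic"] ++
      (ikGroup true 4 "Akademisi" ["university", "universitas", "sekolah", "institute", "academy"] ++
      (ikGroup false 5 "Kesehatan" ["doctor", "physician", "medical", "nurse"] ++
      (ikGroup false 6 "Hukum" ["lawyer", "attorney", "advocate", "legal"] ++
      ikGroup false 7 "Akuntansi/Keuangan" ["accountant", "finance", "accounting", "auditor"])))))) := by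
  rfl

-- once best is set, entries with no smaller priority never replace it
theorem ikRest (p c : String) (j : Nat) (s : String) (l : List (String × Bool × Nat × String))
    (h : l.all (fun e => decide (j ≤ e.2.2.1)) = true) :
    l.foldl (ikStep p c) (some (j, s)) = some (j, s) := by
  induction l with
  | nil => rfl
  | cons e t ih =>
    simp only [List.all_cons, Bool.and_eq_true, decide_eq_true_eq] at h
    have hstep : ikStep p c (some (j, s)) e = some (j, s) := by
      simp only [ikStep, Option.elim_some, decide_eq_false (Nat.not_lt.mpr h.1),
        Bool.and_false, Bool.false_eq_true, if_false]
    rw [List.foldl_cons, hstep]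
    exact ih (by simpa using h.2)

-- folding a group from an empty accumulator yields the group's category iff some keyword matches
theorem ikGroupNone (p c : String) (f : Bool) (i : Nat) (cat : String) (ws : List String) :
    (ikGroup f i cat ws).foldl (ikStep p c) none =
      if (ws.any fun w => PySem.Str.isIn w (cond f c p)) = true then some (i, cat) else none := by
  induction ws with
  | nil => rfl
  | cons w t ih =>
    simp only [ikGroup, List.map_cons, List.foldl_cons, List.any_cons]
    by_cases hw : PySem.Str.isIn w (cond f c p) = true
    · have hstep : ikStep p c none (w, f, i, cat) = some (i, cat) := by
        show (if (PySem.Str.isIn w (cond f c p) && true) = true then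
                some (i, cat) else none) = some (i, cat)
        rw [hw]; rfl
      rw [hstep, ikRest p c i cat _ (by
        simp only [List.all_eq_true]
        intro e he
        obtain ⟨w', _, rfl⟩ := List.mem_map.mp he
        simp)]
      rw [if_pos (by rw [hw]; rfl)]
    · have hw' : PySem.Str.isIn w (cond f c p) = false := by
        revert hw; cases PySem.Str.isIn w (cond f c p) <;> simp
      have hstep : ikStep p c none (w, f, i, cat) = none := by
        show (if (PySem.Str.isIn w (cond f c p) && true) = true then
                some (i, cat) else none) = none
        rw [hw']; rfl
      rw [hstep]
      simp only [hw', Bool.false_or]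
      simpa only [ikGroup] using ih

-- the two fields, specialised (cond false c p / cond true c p reduce definitionally)
theorem ikGroupNoneF (p c : String) (i : Nat) (cat : String) (ws : List String) :
    (ikGroup false i cat ws).foldl (ikStep p c) none =
      if (ws.any fun w => PySem.Str.isIn w p) = true then some (i, cat) else none :=
  ikGroupNone p c false i cat ws

theorem ikGroupNoneT (p c : String) (i : Nat) (cat : String) (ws : List String) :
    (ikGroup true i cat ws).foldl (ikStep p c) none =
      if (ws.any fun w => PySem.Str.isIn w c) = true then some (i, cat) else none :=
  ikGroupNone p c true i cat ws

-- characterisation of B's single fold as a first-match chain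
theorem ikFoldEq (p c : String) :
    ikKeywords.foldl (ikStep p c) none =
      if (["manager", "director", "head", "lead", "chief", "supervisor"].any fun w => PySem.Str.isIn w p) = true then some (0, "Manajemen")
      else if (["developer", "programmer", "engineer", "analyst", "IT", "data"].any fun w => PySem.Str.isIn w p) = true then some (1, "Teknik/Teknologi")
      else if (["consultant", "advisor", "specialist"].any fun w => PySem.Str.isIn w p) = true then some (2, "Konsultan")
      else if (["teacher", "lecturer", "dosen", "guru", "academic"].any fun w => PySem.Str.isIn w p) = true then some (3, "Akademisi")
      else if (["university", "universitas", "sekolah", "institute", "academy"].any fun w => PySem.Str.isIn w c) = true then some (4, "Akademisi")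
      else if (["doctor", "physician", "medical", "nurse"].any fun w => PySem.Str.isIn w p) = true then some (5, "Kesehatan")
      else if (["lawyer", "attorney", "advocate", "legal"].any fun w => PySem.Str.isIn w p) = true then some (6, "Hukum")
      else if (["accountant", "finance", "accounting", "auditor"].any fun w => PySem.Str.isIn w p) = true then some (7, "Akuntansi/Keuangan")
      else none := by
  rw [ikKeywords_eq]
  simp only [List.foldl_append]
  by_cases h1 : (["manager", "director", "head", "lead", "chief", "supervisor"].any fun w => PySem.Str.isIn w p) = true
  · rw [ikGroupNoneF, if_pos h1, ikRest, ikRest, ikRest, ikRest, ikRest, ikRest, ikRest]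
    · simp only [if_pos h1]
    all_goals decide
  · rw [ikGroupNoneF, if_neg h1]
    by_cases h2 : (["developer", "programmer", "engineer", "analyst", "IT", "data"].any fun w => PySem.Str.isIn w p) = true
    · rw [ikGroupNoneF, if_pos h2, ikRest, ikRest, ikRest, ikRest, ikRest, ikRest]
      · simp only [if_neg h1, if_pos h2]
      all_goals decide
    · rw [ikGroupNoneF, if_neg h2]
      by_cases h3 : (["consultant", "advisor", "specialist"].any fun w => PySem.Str.isIn w p) = true
      · rw [ikGroupNoneF, if_pos h3, ikRest, ikRest, ikRest, ikRest, ikRest]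
        · simp only [if_neg h1, if_neg h2, if_pos h3]
        all_goals decide
      · rw [ikGroupNoneF, if_neg h3]
        by_cases h4 : (["teacher", "lecturer", "dosen", "guru", "academic"].any fun w => PySem.Str.isIn w p) = true
        · rw [ikGroupNoneF, if_pos h4, ikRest, ikRest, ikRest, ikRest]
          · simp only [if_neg h1, if_neg h2, if_neg h3, if_pos h4]
          all_goals decide
        · rw [ikGroupNoneF, if_neg h4]
          by_cases h5 : (["university", "universitas", "sekolah", "institute", "academy"].any fun w => PySem.Str.isIn w c) = true
          · rw [ikGroupNoneT, if_pos h5, ikRest, ikRest, ikRest]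
            · simp only [if_neg h1, if_neg h2, if_neg h3, if_neg h4, if_pos h5]
            all_goals decide
          · rw [ikGroupNoneT, if_neg h5]
            by_cases h6 : (["doctor", "physician", "medical", "nurse"].any fun w => PySem.Str.isIn w p) = true
            · rw [ikGroupNoneF, if_pos h6, ikRest, ikRest]
              · simp only [if_neg h1, if_neg h2, if_neg h3, if_neg h4, if_neg h5, if_pos h6]
              all_goals decide
            · rw [ikGroupNoneF, if_neg h6]
              by_cases h7 : (["lawyer", "attorney", "advocate", "legal"].any fun w => PySem.Str.isIn w p) = true
              · rw [ikGroupNoneF, if_pos h7, ikRest]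
                · simp only [if_neg h1, if_neg h2, if_neg h3, if_neg h4, if_neg h5, if_neg h6, if_pos h7]
                all_goals decide
              · rw [ikGroupNoneF, if_neg h7]
                by_cases h8 : (["accountant", "finance", "accounting", "auditor"].any fun w => PySem.Str.isIn w p) = true
                · rw [ikGroupNoneF, if_pos h8]
                  · simp only [if_neg h1, if_neg h2, if_neg h3, if_neg h4, if_neg h5, if_neg h6, if_neg h7]
                · rw [ikGroupNoneF, if_neg h8]
                  simp only [if_neg h1, if_neg h2, if_neg h3, if_neg h4, if_neg h5, if_neg h6, if_neg h7]

-- ===== VERDICT (by name: the statement is the Claim_ definition above) =====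
theorem infer_kategori_py_spec : Claim_equal_infer_kategori_py := by
  intro posisi tempat_kerja _
  show infer_kategori_py posisi tempat_kerja = infer_kategori_py_alt posisi tempat_kerja
  simp only [infer_kategori_py, infer_kategori_py_alt, ikFoldEq]
  split_ifs <;> rfl
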